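-- pv_equiv track=rewrite | github.com/paradime/linear_algebra | linear.py | asOrthogonalVectorTo
-- ===== SOURCE A (Python) =====
-- def scale(scalar, row):
--   return list(map(lambda x: x * scalar, row))
--
-- def addRow(row1, row2):
--   return list(map(lambda i:
--     row1[i] + row2[i], range(0, len(row1))
--   ))
--
-- def height(matrix):
--   return len(matrix)
--
-- def width(matrix):
--   return len(matrix[0])
--
-- def dotProdSimp(row, col):
--   val = 0
--   for i in range(0, len(row)):
--     val += row[i]*col[i]
--   return val
--
-- def dotProd(m1, m2):
--   newMatrix = []
--   for i in range(0, height(m1)):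
--     newMatrix.append([])
--     for j in range(0, width(m2)):
--       newMatrix[i].append(dotProdSimp(m1[i], columnAt(j, m2)))
--   return newMatrix
--
-- def columnAt(index, matrix):
--   column= []
--   for row in matrix:
--     column.append(row[index])
--   return column
--
-- def scaleMatrix(scalar, matrix):
--   newMatrix = []
--   for row in matrix:
--     newMatrix.append(scale(scalar, row))
--   return newMatrix
--
-- def transpose(matrix):
--   newMatrix = []
--   for i in range(0, width(matrix)):
--     newRow = []
--     for row in matrix:
--       newRow.append(row[i])
--     newMatrix.append(newRow)
--   return newMatrix
--
-- def extractColumnMatrix(index, matrix):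
--   return transpose([columnAt(index, matrix)])
--
-- def addMatrix(m1, m2):
--   newMatrix = []
--   for i in range(0, height(m1)):
--     newMatrix.append(addRow(m1[i], m2[i]))
--   return newMatrix
--
-- def asOrthogonalVectorTo(vectorMatrix, orthonormalMatrix):
--   valToSum =[]
--   for i in range(0, width(orthonormalMatrix)):
--     orthogonalVector = extractColumnMatrix(i, orthonormalMatrix)
--     valToSum.append(scaleMatrix(dotProd(
--       transpose(vectorMatrix), orthogonalVector)[0][0],
--       orthogonalVector
--     ))
--   summedMatrix = valToSum[0]
--   for i in range(1, len(valToSum)):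
--     summedMatrix = addMatrix(summedMatrix, valToSum[i])
--   return addMatrix(vectorMatrix, scaleMatrix(-1, summedMatrix))
-- ===== SOURCE B (Python) =====
-- def asOrthogonalVectorTo(vectorMatrix, orthonormalMatrix):
--   # Build the explicit rank-n Gram/projector matrix P = U @ U^T (restricted to the
--   # first n rows/columns) and return v - P @ v, instead of projecting column by column.
--   xs = [x for [x] in vectorMatrix]
--   n = len(xs)
--   k = len(orthonormalMatrix[0])
--   P = [[sum(orthonormalMatrix[r][i] * orthonormalMatrix[s][i] for i in range(k))
--         for s in range(n)] for r in range(n)]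
--   return [[xs[r] - sum(P[r][s] * xs[s] for s in range(n))] for r in range(n)]
-- ===== Notes on version B (the rewrite author's own statement) =====
-- stated objective: alternative
-- what changed: B builds the explicit n-by-n projector matrix P = U*U^T (a Gram matrix of the basis rows) once and returns v - P*v by a matrix-vector product, instead of A's column-by-column pipeline that scales each basis column by its coefficient and folds the k column matrices together with addMatrix; correctness is the sum interchange sum_i (v.u_i) u_i = (sum_i u_i u_i^T) v.
import Mathlib
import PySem

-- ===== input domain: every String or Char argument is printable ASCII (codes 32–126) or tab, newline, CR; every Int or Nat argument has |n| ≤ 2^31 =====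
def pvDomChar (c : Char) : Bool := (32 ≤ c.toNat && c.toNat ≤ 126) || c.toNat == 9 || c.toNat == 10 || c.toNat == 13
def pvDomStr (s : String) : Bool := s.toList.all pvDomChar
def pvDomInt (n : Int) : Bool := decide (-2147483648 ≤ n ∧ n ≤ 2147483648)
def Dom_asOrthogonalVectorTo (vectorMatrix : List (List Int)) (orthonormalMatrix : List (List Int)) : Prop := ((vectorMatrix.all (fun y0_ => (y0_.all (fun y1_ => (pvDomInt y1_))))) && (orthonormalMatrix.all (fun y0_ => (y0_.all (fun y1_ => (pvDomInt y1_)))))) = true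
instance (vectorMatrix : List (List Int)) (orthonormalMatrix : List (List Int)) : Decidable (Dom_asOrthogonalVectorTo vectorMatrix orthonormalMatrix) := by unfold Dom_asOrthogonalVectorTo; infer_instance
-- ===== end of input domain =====

-- B builds the explicit n×n projector matrix P = U·Uᵀ once and returns v − P·v, instead of
-- A's column-by-column pipeline (scale each basis column by its coefficient, fold the k
-- column matrices with addMatrix); correct by the sum interchange Σᵢ(v·uᵢ)uᵢ = (Σᵢ uᵢuᵢᵀ)v.

-- ===== PORT A =====
def pyScale (scalar : Int) (row : List Int) : List Int := row.map (fun x => x * scalar)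

def pyAddRow (row1 row2 : List Int) : List Int :=
  (PySem.List.pyRange 0 (row1.length : Int) 1).map
    (fun i => PySem.List.pyGetD row1 i 0 + PySem.List.pyGetD row2 i 0)

def pyHeight (m : List (List Int)) : Int := m.length

def pyWidth (m : List (List Int)) : Int := (PySem.List.pyGetD m 0 []).length

def pyDotProdSimp (row col : List Int) : Int :=
  (PySem.List.pyRange 0 (row.length : Int) 1).foldl
    (fun val i => val + PySem.List.pyGetD row i 0 * PySem.List.pyGetD col i 0) 0

def pyColumnAt (index : Int) (m : List (List Int)) : List Int :=
  m.map (fun row => PySem.List.pyGetD row index 0)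

def pyDotProd (m1 m2 : List (List Int)) : List (List Int) :=
  (PySem.List.pyRange 0 (pyHeight m1) 1).map (fun i =>
    (PySem.List.pyRange 0 (pyWidth m2) 1).map (fun j =>
      pyDotProdSimp (PySem.List.pyGetD m1 i []) (pyColumnAt j m2)))

def pyScaleMatrix (scalar : Int) (m : List (List Int)) : List (List Int) :=
  m.map (fun row => pyScale scalar row)

def pyTranspose (m : List (List Int)) : List (List Int) :=
  (PySem.List.pyRange 0 (pyWidth m) 1).map (fun i => m.map (fun row => PySem.List.pyGetD row i 0))

def pyExtractColumnMatrix (index : Int) (m : List (List Int)) : List (List Int) :=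
  pyTranspose [pyColumnAt index m]

def pyAddMatrix (m1 m2 : List (List Int)) : List (List Int) :=
  (PySem.List.pyRange 0 (pyHeight m1) 1).map
    (fun i => pyAddRow (PySem.List.pyGetD m1 i []) (PySem.List.pyGetD m2 i []))

def asOrthogonalVectorTo (vectorMatrix : List (List Int)) (orthonormalMatrix : List (List Int)) : List (List Int) :=
  let valToSum := (PySem.List.pyRange 0 (pyWidth orthonormalMatrix) 1).map (fun i =>
    let orthogonalVector := pyExtractColumnMatrix i orthonormalMatrix
    pyScaleMatrix
      (PySem.List.pyGetD
        (PySem.List.pyGetD (pyDotProd (pyTranspose vectorMatrix) orthogonalVector) 0 []) 0 0)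
      orthogonalVector)
  let summedMatrix := (PySem.List.pyRange 1 (valToSum.length : Int) 1).foldl
    (fun s i => pyAddMatrix s (PySem.List.pyGetD valToSum i []))
    (PySem.List.pyGetD valToSum 0 [])
  pyAddMatrix vectorMatrix (pyScaleMatrix (-1) summedMatrix)

-- ===== PORT B =====
def asOrthogonalVectorTo_alt (vectorMatrix : List (List Int)) (orthonormalMatrix : List (List Int)) : List (List Int) :=
  let xs : List Int := vectorMatrix.map (fun row => PySem.List.pyGetD row 0 0)
  let n : Int := xs.length
  let k : Int := (PySem.List.pyGetD orthonormalMatrix 0 []).length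
  let P : List (List Int) := (PySem.List.pyRange 0 n 1).map (fun r =>
    (PySem.List.pyRange 0 n 1).map (fun s =>
      ((PySem.List.pyRange 0 k 1).map (fun i =>
        PySem.List.pyGetD (PySem.List.pyGetD orthonormalMatrix r []) i 0 *
        PySem.List.pyGetD (PySem.List.pyGetD orthonormalMatrix s []) i 0)).sum))
  (PySem.List.pyRange 0 n 1).map (fun r =>
    [PySem.List.pyGetD xs r 0 -
     ((PySem.List.pyRange 0 n 1).map (fun s =>
        PySem.List.pyGetD (PySem.List.pyGetD P r []) s 0 *
        PySem.List.pyGetD xs s 0)).sum])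

-- ===== PRECONDITION & SPEC =====
-- Pre_ is exactly the set of inputs on which Python A returns normally (everywhere else A
-- raises IndexError: empty matrices, a vector row of length ≠ 1, a zero-width or ragged
-- basis with a row shorter than row 0, or a vector taller than the basis).
def Pre_asOrthogonalVectorTo (vectorMatrix : List (List Int)) (orthonormalMatrix : List (List Int)) : Prop :=
  vectorMatrix ≠ [] ∧ (∀ row ∈ vectorMatrix, row.length = 1) ∧
  orthonormalMatrix ≠ [] ∧ 0 < (orthonormalMatrix.headI).length ∧
  (∀ row ∈ orthonormalMatrix, (orthonormalMatrix.headI).length ≤ row.length) ∧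
  vectorMatrix.length ≤ orthonormalMatrix.length

instance (vectorMatrix : List (List Int)) (orthonormalMatrix : List (List Int)) : Decidable (Pre_asOrthogonalVectorTo vectorMatrix orthonormalMatrix) := by
  unfold Pre_asOrthogonalVectorTo; infer_instance

def pvWitness_asOrthogonalVectorTo : List (List Int) × List (List Int) :=
  ([[3], [4]], [[1, 0], [0, 1]])

def Spec_asOrthogonalVectorTo (vectorMatrix : List (List Int)) (orthonormalMatrix : List (List Int)) (out : List (List Int)) : Prop := out = asOrthogonalVectorTo_alt vectorMatrix orthonormalMatrix
instance (vectorMatrix : List (List Int)) (orthonormalMatrix : List (List Int)) (out : List (List Int)) : Decidable (Spec_asOrthogonalVectorTo vectorMatrix orthonormalMatrix out) := by unfold Spec_asOrthogonalVectorTo; infer_instance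

-- ===== CLAIM (what is proved, stated in full; the proofs are below) =====
def Claim_equal_asOrthogonalVectorTo : Prop := ∀ (vectorMatrix : List (List Int)) (orthonormalMatrix : List (List Int)), Dom_asOrthogonalVectorTo vectorMatrix orthonormalMatrix → Pre_asOrthogonalVectorTo vectorMatrix orthonormalMatrix → Spec_asOrthogonalVectorTo vectorMatrix orthonormalMatrix (asOrthogonalVectorTo vectorMatrix orthonormalMatrix)


-- ===== LEMMAS AND PROOFS =====

-- map of a composed function over an index range collapses to a map over the list
theorem mapF_pyRange {α β : Type} (xs : List α) (d : α) (F : α → β) :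
    (PySem.List.pyRange 0 (xs.length : Int) 1).map (fun j => F (PySem.List.pyGetD xs j d)) = xs.map F := by
  have h : (fun j => F (PySem.List.pyGetD xs j d)) = F ∘ (fun j => PySem.List.pyGetD xs j d) := rfl
  rw [h, ← List.map_map, PySem.List.map_pyGetD_pyRange_zero']

theorem addRow_single (a b : Int) : pyAddRow [a] [b] = [a + b] := by
  simp [pyAddRow, show PySem.List.pyRange 0 (1:Int) 1 = [0] by decide, PySem.List.pyGetD_zero_cons]

theorem scale_single (c x : Int) : pyScale c [x] = [x * c] := rfl

theorem addMatrix_maps (p q : List Int → Int) (U : List (List Int)) :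
    pyAddMatrix (U.map fun row => [p row]) (U.map fun row => [q row])
      = U.map (fun row => [p row + q row]) := by
  unfold pyAddMatrix pyHeight
  apply List.ext_getElem
  · simp [PySem.List.length_pyRange_one]
  · intro r h1 h2
    have hrU : r < U.length := by simpa using h2
    simp only [List.getElem_map, PySem.List.getElem_pyRange_one, zero_add]
    rw [PySem.List.pyGetD_eq_getElem _ _ (by positivity) (by simp [hrU]),
        PySem.List.pyGetD_eq_getElem _ _ (by positivity) (by simp [hrU])]
    simp [addRow_single]

theorem foldl_addMatrix (U : List (List Int)) (I : List Int) (f : Int → List Int → Int) (g : List Int → Int) :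
    (I.map (fun i => U.map (fun row => [f i row]))).foldl pyAddMatrix (U.map (fun row => [g row]))
      = U.map (fun row => [g row + (I.map (fun i => f i row)).sum]) := by
  induction I generalizing g with
  | nil => simp
  | cons i I ih =>
    simp only [List.map_cons, List.foldl_cons, addMatrix_maps]
    rw [ih (fun row => g row + f i row)]
    simp [add_assoc]

-- interchange of a double list sum (Fubini for finite sums)
theorem list_sum_comm {α β : Type} (l1 : List α) (l2 : List β) (f : α → β → Int) :
    (l1.map (fun a => (l2.map (fun b => f a b)).sum)).sum
      = (l2.map (fun b => (l1.map (fun a => f a b)).sum)).sum := by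
  induction l1 with
  | nil => simp
  | cons a t ih =>
    simp only [List.map_cons, List.sum_cons, ih]
    rw [PySem.List.sum_map_add_int]

-- proof-side abbreviations for A's intermediate values
def colv (v : List (List Int)) : List Int := v.map (fun row => PySem.List.pyGetD row 0 0)

def cA (v U : List (List Int)) (i : Int) : Int := pyDotProdSimp (colv v) (pyColumnAt i U)

theorem transpose_v (v : List (List Int)) (hv : v ≠ []) (hv1 : ∀ row ∈ v, row.length = 1) :
    pyTranspose v = [colv v] := by
  obtain ⟨r, t, rfl⟩ := List.exists_cons_of_ne_nil hv
  simp [pyTranspose, pyWidth, colv, PySem.List.pyGetD_zero_cons, hv1 r List.mem_cons_self,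
    show PySem.List.pyRange 0 (1:Int) 1 = [0] by decide]

theorem ov_eq (U : List (List Int)) (i : Int) :
    pyExtractColumnMatrix i U = (pyColumnAt i U).map (fun x => [x]) := by
  unfold pyExtractColumnMatrix pyTranspose pyWidth
  rw [PySem.List.pyGetD_zero_cons]
  exact mapF_pyRange (pyColumnAt i U) 0 (fun x => [x])

theorem scaleMatrix_ov (c : Int) (U : List (List Int)) (i : Int) :
    pyScaleMatrix c ((pyColumnAt i U).map (fun x => [x]))
      = U.map (fun row => [PySem.List.pyGetD row i 0 * c]) := by
  simp [pyScaleMatrix, pyColumnAt, List.map_map, Function.comp_def, scale_single]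

theorem dot_scalar (v U : List (List Int)) (i : Int) (hv : v ≠ [])
    (hv1 : ∀ row ∈ v, row.length = 1) (hU : U ≠ []) :
    PySem.List.pyGetD
      (PySem.List.pyGetD (pyDotProd (pyTranspose v) (pyExtractColumnMatrix i U)) 0 []) 0 0
      = cA v U i := by
  rw [transpose_v v hv hv1, ov_eq]
  obtain ⟨x, xs, hx⟩ : ∃ x xs, pyColumnAt i U = x :: xs := by
    obtain ⟨u, t, rfl⟩ := List.exists_cons_of_ne_nil hU
    exact ⟨_, _, rfl⟩
  unfold pyDotProd pyHeight pyWidth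
  rw [hx]
  simp only [PySem.List.pyGetD_zero_cons, pyColumnAt, List.map_map, Function.comp_def, cA,
    List.map_cons, List.length_cons]
  simp [PySem.List.pyGetD_zero_cons, show PySem.List.pyRange 0 (1:Int) 1 = [0] by decide]
  exact congrArg (pyDotProdSimp (colv v)) hx.symm

-- cA as an explicit sum over the rows of v and U
theorem cA_sum (v U : List (List Int)) (hnU : v.length ≤ U.length) (i : Int) :
    cA v U i = ((PySem.List.pyRange 0 (v.length : Int) 1).map (fun s =>
      PySem.List.pyGetD (PySem.List.pyGetD v s []) 0 0 *
      PySem.List.pyGetD (PySem.List.pyGetD U s []) i 0)).sum := by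
  unfold cA pyDotProdSimp colv pyColumnAt
  rw [PySem.List.foldl_add, zero_add,
    show ((v.map (fun row => PySem.List.pyGetD row 0 0)).length : Int) = (v.length : Int) by simp]
  refine congrArg List.sum (List.map_congr_left (fun s hs => ?_))
  rw [PySem.List.mem_pyRange_one] at hs
  have hsv : s.toNat < v.length := by omega
  have hsU : s.toNat < U.length := lt_of_lt_of_le hsv hnU
  have hlv : (v.length : Int) ≤ (U.length : Int) := by exact_mod_cast hnU
  rw [PySem.List.pyGetD_eq_getElem _ 0 hs.1 (by simpa using hs.2),
      PySem.List.pyGetD_eq_getElem _ 0 hs.1 (by simp; omega),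
      PySem.List.pyGetD_eq_getElem v [] hs.1 hs.2,
      PySem.List.pyGetD_eq_getElem U [] hs.1 (by omega)]
  simp

-- ===== VERDICT (by name: the statement is the Claim_ definition above) =====
theorem asOrthogonalVectorTo_spec : Claim_equal_asOrthogonalVectorTo := by
  intro v U _hdom hpre
  obtain ⟨hv, hv1, hU, hk, hUk, hnU⟩ := hpre
  unfold Spec_asOrthogonalVectorTo
  have hget0 : PySem.List.pyGetD U 0 [] = U.headI := by
    obtain ⟨u0, Ut, rfl⟩ := List.exists_cons_of_ne_nil hU
    rw [PySem.List.pyGetD_zero_cons]; rfl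
  set k : Int := (U.headI.length : Int) with hkdef
  have hk' : (0:Int) < k := by rw [hkdef]; exact_mod_cast hk
  have hwidth : pyWidth U = k := by simp [pyWidth, hget0, hkdef]
  have hfun : ∀ i : Int,
      pyScaleMatrix
        (PySem.List.pyGetD
          (PySem.List.pyGetD (pyDotProd (pyTranspose v) (pyExtractColumnMatrix i U)) 0 []) 0 0)
        (pyExtractColumnMatrix i U)
        = U.map (fun row => [PySem.List.pyGetD row i 0 * cA v U i]) := by
    intro i
    rw [dot_scalar v U i hv hv1 hU, ov_eq, scaleMatrix_ov]
  have hA : asOrthogonalVectorTo v U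
      = pyAddMatrix v (pyScaleMatrix (-1) (U.map (fun row =>
          [PySem.List.pyGetD row 0 0 * cA v U 0 +
           ((PySem.List.pyRange 1 k 1).map (fun i => PySem.List.pyGetD row i 0 * cA v U i)).sum]))) := by
    simp only [asOrthogonalVectorTo]
    rw [hwidth]
    rw [List.map_congr_left (fun i _ => hfun i)]
    rw [PySem.List.foldl_pyRange_pyGetD' _ _ pyAddMatrix _ (by norm_num)]
    rw [PySem.List.pyRange_one_cons hk']
    simp only [List.map_cons, List.drop_succ_cons, List.drop_zero, PySem.List.pyGetD_zero_cons,
      Int.toNat_one, zero_add]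
    rw [foldl_addMatrix U (PySem.List.pyRange 1 k 1)
      (fun i row => PySem.List.pyGetD row i 0 * cA v U i)
      (fun row => PySem.List.pyGetD row 0 0 * cA v U 0)]
  have hB : asOrthogonalVectorTo_alt v U
      = (PySem.List.pyRange 0 (v.length : Int) 1).map (fun r =>
          [PySem.List.pyGetD (PySem.List.pyGetD v r []) 0 0 -
           ((PySem.List.pyRange 0 (v.length : Int) 1).map (fun s =>
              ((PySem.List.pyRange 0 k 1).map (fun i =>
                PySem.List.pyGetD (PySem.List.pyGetD U r []) i 0 *
                PySem.List.pyGetD (PySem.List.pyGetD U s []) i 0)).sum *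
              PySem.List.pyGetD (PySem.List.pyGetD v s []) 0 0)).sum]) := by
    simp only [asOrthogonalVectorTo_alt]
    rw [hget0]
    rw [show ((v.map (fun row => PySem.List.pyGetD row 0 0)).length : Int) = (v.length : Int) by
      simp]
    refine List.map_congr_left (fun r hr => ?_)
    rw [PySem.List.mem_pyRange_one] at hr
    have hrv : r.toNat < v.length := by omega
    rw [PySem.List.pyGetD_eq_getElem (v.map (fun row => PySem.List.pyGetD row 0 0)) 0 hr.1
          (by simpa using hr.2),
        PySem.List.pyGetD_eq_getElem v [] hr.1 hr.2]
    simp only [List.getElem_map]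
    refine congrArg (fun z => [PySem.List.pyGetD v[r.toNat] 0 0 - z]) ?_
    rw [PySem.List.pyGetD_map_pyRange_of_nonneg _ _ r [] hr.1 hr.2]
    refine congrArg List.sum (List.map_congr_left (fun s hs => ?_))
    rw [PySem.List.mem_pyRange_one] at hs
    have hsv : s.toNat < v.length := by omega
    rw [PySem.List.pyGetD_map_pyRange_of_nonneg _ _ s 0 hs.1 hs.2,
        PySem.List.pyGetD_eq_getElem (v.map (fun row => PySem.List.pyGetD row 0 0)) 0 hs.1
          (by simpa using hs.2),
        PySem.List.pyGetD_eq_getElem v [] hs.1 hs.2]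
    simp only [List.getElem_map]; rw [hkdef]
  rw [hA, hB]
  apply List.ext_getElem
  · simp [pyAddMatrix, pyHeight, PySem.List.length_pyRange_one]
  · intro r h1 h2
    have hrv : r < v.length := by
      simpa [PySem.List.length_pyRange_one] using h2
    have hrU : r < U.length := lt_of_lt_of_le hrv hnU
    simp only [pyAddMatrix, pyHeight, List.getElem_map, PySem.List.getElem_pyRange_one, zero_add]
    rw [PySem.List.pyGetD_eq_getElem v [] (by positivity) (by exact_mod_cast hrv),
        PySem.List.pyGetD_eq_getElem _ [] (by positivity)
          (by simp [pyScaleMatrix]; exact_mod_cast hrU),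
        PySem.List.pyGetD_eq_getElem U [] (by positivity) (by exact_mod_cast hrU)]
    simp only [Int.toNat_natCast]
    obtain ⟨a, ha⟩ := List.length_eq_one_iff.mp (hv1 v[r] (List.getElem_mem hrv))
    rw [ha]
    simp only [pyScaleMatrix, List.getElem_map, scale_single]
    rw [addRow_single, PySem.List.pyGetD_zero_cons]
    -- the scalar identity: Σ_i U[r][i]·cA i  =  Σ_s (Σ_i U[r][i]U[s][i])·v[s][0]
    have hkey :
        PySem.List.pyGetD U[r] 0 0 * cA v U 0 +
          ((PySem.List.pyRange 1 k 1).map (fun i => PySem.List.pyGetD U[r] i 0 * cA v U i)).sum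
        = ((PySem.List.pyRange 0 (v.length : Int) 1).map (fun s =>
            ((PySem.List.pyRange 0 k 1).map (fun i =>
              PySem.List.pyGetD (PySem.List.pyGetD U (r : Int) []) i 0 *
              PySem.List.pyGetD (PySem.List.pyGetD U s []) i 0)).sum *
            PySem.List.pyGetD (PySem.List.pyGetD v s []) 0 0)).sum := by
      rw [show PySem.List.pyGetD U[r] 0 0 * cA v U 0 +
            ((PySem.List.pyRange 1 k 1).map (fun i => PySem.List.pyGetD U[r] i 0 * cA v U i)).sum
          = ((PySem.List.pyRange 0 k 1).map (fun i => PySem.List.pyGetD U[r] i 0 * cA v U i)).sum by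
        rw [PySem.List.pyRange_one_cons hk', List.map_cons, List.sum_cons]; norm_num]
      have hUr : PySem.List.pyGetD U (r : Int) [] = U[r] := by
        rw [PySem.List.pyGetD_eq_getElem U [] (by positivity) (by exact_mod_cast hrU)]; simp
      simp only [hUr]
      -- expand cA, push U[r][i] inside the inner sum, swap the two sums, refactor
      calc ((PySem.List.pyRange 0 k 1).map (fun i => PySem.List.pyGetD U[r] i 0 * cA v U i)).sum
          = ((PySem.List.pyRange 0 k 1).map (fun i =>
              ((PySem.List.pyRange 0 (v.length : Int) 1).map (fun s =>
                PySem.List.pyGetD U[r] i 0 *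
                (PySem.List.pyGetD (PySem.List.pyGetD v s []) 0 0 *
                 PySem.List.pyGetD (PySem.List.pyGetD U s []) i 0))).sum)).sum := by
            refine congrArg List.sum (List.map_congr_left (fun i _ => ?_))
            rw [cA_sum v U hnU i, ← List.sum_map_mul_left]
        _ = ((PySem.List.pyRange 0 (v.length : Int) 1).map (fun s =>
              ((PySem.List.pyRange 0 k 1).map (fun i =>
                PySem.List.pyGetD U[r] i 0 *
                (PySem.List.pyGetD (PySem.List.pyGetD v s []) 0 0 *
                 PySem.List.pyGetD (PySem.List.pyGetD U s []) i 0))).sum)).sum :=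
            list_sum_comm _ _ _
        _ = _ := by
            refine congrArg List.sum (List.map_congr_left (fun s _ => ?_))
            rw [← List.sum_map_mul_right]
            refine congrArg List.sum (List.map_congr_left (fun i _ => ?_))
            ring
    have hUr2 : PySem.List.pyGetD U (r : Int) [] = U[r] := by
      rw [PySem.List.pyGetD_eq_getElem U [] (by positivity) (by exact_mod_cast hrU)]; simp
    rw [hkey]
    simp only [hUr2]
    ring_nf
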